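-- pv_equiv track=rewrite | github.com/phil-fradkin/contrastive_rna | contrastive_rna_representation/gene_dataset.py | batch_transcript_dict
-- ===== SOURCE A (Python) =====
-- def batch_transcript_dict(
--     transcript_dict, n_genes_per_sub_dict=150, drop_single_t_genes=False
-- ):
--     transcript_dict_part = dict()
--     transcript_dict.keys()
--     transcript_dicts = list()
--
--     for i, (gene, transcripts) in enumerate(transcript_dict.items()):
--         # 1500 genes per transcript dict part
--         if i % n_genes_per_sub_dict == 0 and i != 0:
--             transcript_dicts.append(transcript_dict_part)
--             transcript_dict_part = dict()
--
--         # if drop single transcript don't write it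
--         if drop_single_t_genes and len(transcripts) == 1:
--             continue
--
--         # add gene and transcripts to part of transcript_dict
--         transcript_dict_part[gene] = transcripts
--
--     return transcript_dicts
-- ===== SOURCE B (Python) =====
-- def batch_transcript_dict(
--     transcript_dict, n_genes_per_sub_dict=150, drop_single_t_genes=False
-- ):
--     items = list(transcript_dict.items())
--     per = n_genes_per_sub_dict
--     result = []
--     # emit one chunk of `per` genes as long as strictly more than `per` remain:
--     # exactly reproduces A's quirk that the trailing segment after the last
--     # boundary (even a full one when len is an exact multiple) is never emitted
--     while len(items) > per:
--         chunk, items = items[:per], items[per:]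
--         result.append({
--             gene: transcripts
--             for gene, transcripts in chunk
--             if not (drop_single_t_genes and len(transcripts) == 1)
--         })
--     return result
-- ===== Notes on version B (the rewrite author's own statement) =====
-- stated objective: simpler
-- what changed: Replaces A's enumerate-with-modulo streaming loop (running part dict, boundary test i % per == 0 and i != 0, leftover part silently discarded) by direct slicing: while more than per items remain, slice off the first per items and build the sub-dict with a filtering comprehension; the trailing segment is never emitted, matching A.
-- outside the precondition, e.g. on batch_transcript_dict({}, -1, True): A returns [], B does not finish within the time limit
import Mathlib
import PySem

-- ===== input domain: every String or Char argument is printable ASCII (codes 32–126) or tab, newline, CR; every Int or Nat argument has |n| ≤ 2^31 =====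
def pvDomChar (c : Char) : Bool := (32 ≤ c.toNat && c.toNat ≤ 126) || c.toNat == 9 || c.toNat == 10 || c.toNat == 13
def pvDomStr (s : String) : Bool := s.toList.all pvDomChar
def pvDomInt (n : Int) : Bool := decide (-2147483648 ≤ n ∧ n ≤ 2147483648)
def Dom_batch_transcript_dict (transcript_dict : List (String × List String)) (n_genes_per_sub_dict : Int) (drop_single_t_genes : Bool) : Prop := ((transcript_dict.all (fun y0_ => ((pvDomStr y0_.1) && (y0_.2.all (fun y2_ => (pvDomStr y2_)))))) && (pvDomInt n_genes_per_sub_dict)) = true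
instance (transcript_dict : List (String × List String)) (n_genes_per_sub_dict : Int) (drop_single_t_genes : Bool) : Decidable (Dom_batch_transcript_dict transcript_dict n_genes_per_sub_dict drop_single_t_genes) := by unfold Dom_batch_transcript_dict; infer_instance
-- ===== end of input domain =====

-- ===== PORT A =====
-- B replaces A's enumerate-with-modulo streaming loop by direct per-sized slicing (simpler decomposition);
-- equal return values for chunk size ≥ 1 (Pre_); neither mutates its argument.
def batch_transcript_dict (transcript_dict : List (String × List String)) (n_genes_per_sub_dict : Int) (drop_single_t_genes : Bool) : List (List (String × List String)) :=
  let st := (PySem.List.enumerate transcript_dict 0).foldl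
    (fun (s : PySem.Dict String (List String) × List (PySem.Dict String (List String)))
         (p : Int × (String × List String)) =>
      -- if i % n_genes_per_sub_dict == 0 and i != 0: append part, start a fresh part
      let s := if PySem.Int.mod p.1 n_genes_per_sub_dict == 0 && p.1 != 0 then
                 (PySem.Dict.empty, s.2 ++ [s.1]) else s
      -- if drop_single_t_genes and len(transcripts) == 1: continue
      if drop_single_t_genes && p.2.2.length == 1 then s
      else (s.1.insert p.2.1 p.2.2, s.2))
    (PySem.Dict.empty, [])
  st.2.map PySem.Dict.items

-- ===== PORT B =====
-- Source B's while loop; the fuel argument only totalizes it (it is transcript_dict.length at the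
-- top call, enough iterations whenever 1 ≤ n, i.e. on all of Pre_)
def bt_chunks (n : Int) (drop : Bool) : Nat → List (String × List String) → List (List (String × List String))
  | 0, _ => []
  | fuel + 1, items =>
    if n < (items.length : Int) then
      ((PySem.List.slice items none (some n)).foldl
          (fun d (q : String × List String) =>
            if drop && q.2.length == 1 then d else d.insert q.1 q.2)
          PySem.Dict.empty).items
        :: bt_chunks n drop fuel (PySem.List.slice items (some n) none)
    else []

def batch_transcript_dict_alt (transcript_dict : List (String × List String)) (n_genes_per_sub_dict : Int) (drop_single_t_genes : Bool) : List (List (String × List String)) :=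
  bt_chunks n_genes_per_sub_dict drop_single_t_genes transcript_dict.length transcript_dict

-- ===== PRECONDITION & SPEC =====
-- Pre_ restricts to the natural domain of a chunk size: n ≥ 1. A raises ZeroDivisionError at n = 0;
-- for n < 0 A happens to chunk by |n| (an accident of `i % n == 0`) while B's while loop never terminates.
def Pre_batch_transcript_dict (transcript_dict : List (String × List String)) (n_genes_per_sub_dict : Int) (drop_single_t_genes : Bool) : Prop :=
  1 ≤ n_genes_per_sub_dict
instance (transcript_dict : List (String × List String)) (n_genes_per_sub_dict : Int) (drop_single_t_genes : Bool) : Decidable (Pre_batch_transcript_dict transcript_dict n_genes_per_sub_dict drop_single_t_genes) := by unfold Pre_batch_transcript_dict; infer_instance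

def pvWitness_batch_transcript_dict : (List (String × List String)) × Int × Bool :=
  ([("g1", ["t1", "t2"]), ("g2", ["t3"]), ("g3", ["t4", "t5"])], 2, true)

def Spec_batch_transcript_dict (transcript_dict : List (String × List String)) (n_genes_per_sub_dict : Int) (drop_single_t_genes : Bool) (out : List (List (String × List String))) : Prop := out = batch_transcript_dict_alt transcript_dict n_genes_per_sub_dict drop_single_t_genes
instance (transcript_dict : List (String × List String)) (n_genes_per_sub_dict : Int) (drop_single_t_genes : Bool) (out : List (List (String × List String))) : Decidable (Spec_batch_transcript_dict transcript_dict n_genes_per_sub_dict drop_single_t_genes out) := by unfold Spec_batch_transcript_dict; infer_instance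

-- ===== CLAIM (what is proved, stated in full; the proofs are below) =====
def Claim_equal_batch_transcript_dict : Prop := ∀ (transcript_dict : List (String × List String)) (n_genes_per_sub_dict : Int) (drop_single_t_genes : Bool), Dom_batch_transcript_dict transcript_dict n_genes_per_sub_dict drop_single_t_genes → Pre_batch_transcript_dict transcript_dict n_genes_per_sub_dict drop_single_t_genes → Spec_batch_transcript_dict transcript_dict n_genes_per_sub_dict drop_single_t_genes (batch_transcript_dict transcript_dict n_genes_per_sub_dict drop_single_t_genes)

-- ===== LEMMAS AND PROOFS =====

-- the shared per-gene insertion (definitionally the lambda of both ports)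
def pvIns (drop : Bool) (d : PySem.Dict String (List String)) (q : String × List String) : PySem.Dict String (List String) :=
  if drop && q.2.length == 1 then d else d.insert q.1 q.2

-- A's loop body
def pvStep (n : Int) (drop : Bool)
    (s : PySem.Dict String (List String) × List (PySem.Dict String (List String)))
    (p : Int × (String × List String)) :
    PySem.Dict String (List String) × List (PySem.Dict String (List String)) :=
  let s := if PySem.Int.mod p.1 n == 0 && p.1 != 0 then (PySem.Dict.empty, s.2 ++ [s.1]) else s
  if drop && p.2.2.length == 1 then s else (s.1.insert p.2.1 p.2.2, s.2)

theorem batch_eq_foldl_pvStep (td : List (String × List String)) (n : Int) (drop : Bool) :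
    batch_transcript_dict td n drop =
      (((PySem.List.enumerate td 0).foldl (pvStep n drop) (PySem.Dict.empty, [])).2).map PySem.Dict.items := rfl

-- an index strictly between two consecutive multiples of n is no boundary
theorem pv_mod_ne_zero (n s t : Int) (hdvd : n ∣ s) (h1 : s < t) (h2 : t < s + n) :
    PySem.Int.mod t n ≠ 0 := by
  intro hdt
  rw [PySem.Int.mod_eq_zero_iff_dvd] at hdt
  have : n ∣ (t - s) := Dvd.dvd.sub hdt hdvd
  have hle : n ≤ t - s := Int.le_of_dvd (by omega) this
  omega

-- a stretch of non-boundary indices only feeds the running part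
theorem pv_noBoundary (n : Int) (drop : Bool) (l : List (String × List String)) :
    ∀ (s : Int) (part : PySem.Dict String (List String)) (acc : List (PySem.Dict String (List String))),
    (∀ j : Nat, j < l.length → (s + j = 0 ∨ PySem.Int.mod (s + j) n ≠ 0)) →
    (PySem.List.enumerate l s).foldl (pvStep n drop) (part, acc) = (l.foldl (pvIns drop) part, acc) := by
  induction l with
  | nil => intro s part acc _; simp [PySem.List.enumerate_nil]
  | cons x r ih =>
    intro s part acc h
    rw [PySem.List.enumerate_cons, List.foldl_cons, List.foldl_cons]
    have h0 : pvStep n drop (part, acc) (s, x) = (pvIns drop part x, acc) := by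
      have := h 0 (by simp)
      simp only [Nat.cast_zero, add_zero] at this
      unfold pvStep pvIns
      rcases this with h' | h' <;> simp [h'] <;> split <;> rfl
    rw [h0, ih (s + 1)]
    intro j hj
    have := h (j + 1) (by simpa using Nat.succ_lt_succ hj)
    push_cast at this
    rw [show s + ((j : Int) + 1) = (s + 1) + (j : Int) by ring] at this
    exact this

-- main invariant: from a boundary index s (0 < s, n ∣ s), A's loop emits acc, the incoming part,
-- and then exactly B's chunks of the remaining items
theorem pv_main (n : Int) (drop : Bool) (hn : 1 ≤ n) :
    ∀ (fuel : Nat) (l : List (String × List String)), l ≠ [] → l.length ≤ fuel →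
    ∀ (s : Int) (part : PySem.Dict String (List String)) (acc : List (PySem.Dict String (List String))),
    0 < s → n ∣ s →
    (((PySem.List.enumerate l s).foldl (pvStep n drop) (part, acc)).2).map PySem.Dict.items =
      acc.map PySem.Dict.items ++ part.items :: bt_chunks n drop fuel l := by
  intro fuel
  induction fuel with
  | zero => intro l hne hlen; simp [List.length_eq_zero_iff] at hlen; exact absurd hlen hne
  | succ fuel ih =>
    intro l hne hlen s part acc hs hdvd
    obtain ⟨x, r, rfl⟩ := List.exists_cons_of_ne_nil hne
    have hlcons : (x :: r).length = r.length + 1 := rfl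
    have hb : pvStep n drop (part, acc) (s, x) = (pvIns drop PySem.Dict.empty x, acc ++ [part]) := by
      have hm : PySem.Int.mod s n = 0 := (PySem.Int.mod_eq_zero_iff_dvd s n).mpr hdvd
      unfold pvStep pvIns
      have hs0 : s ≠ 0 := by omega
      simp [hm, hs0]
      split <;> rfl
    by_cases hsmall : ((x :: r).length : Int) ≤ n
    · -- no further boundary: nothing more is emitted, and B emits no chunk either
      rw [PySem.List.enumerate_cons, List.foldl_cons, hb,
          pv_noBoundary n drop r (s + 1) (pvIns drop PySem.Dict.empty x) (acc ++ [part])]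
      · have hguard : ¬ n < (((x :: r).length : Nat) : Int) := by omega
        conv_rhs => rw [bt_chunks]
        rw [if_neg hguard]
        simp
      · intro j hj
        right
        refine pv_mod_ne_zero n s (s + 1 + j) hdvd (by omega) ?_
        have hjr : (j : Int) < (r.length : Int) := by exact_mod_cast hj
        have hlc : ((x :: r).length : Int) = (r.length : Int) + 1 := by simp
        omega
    · -- a full chunk of n items, then recurse at boundary s + n
      push_neg at hsmall
      have hsm : n.toNat < (x :: r).length := by omega
      set u := (x :: r).take n.toNat with hu
      set v := (x :: r).drop n.toNat with hv
      have hlenu : u.length = n.toNat := by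
        simp [hu, List.length_take]
        omega
      have hsplit : (x :: r) = u ++ v := (List.take_append_drop _ _).symm
      have hultail : u = x :: (r.take (n.toNat - 1)) := by
        simp only [hu]
        rw [show n.toNat = (n.toNat - 1) + 1 by omega, List.take_succ_cons]
        norm_num
      -- fold over the first chunk
      have hchunk : (PySem.List.enumerate u s).foldl (pvStep n drop) (part, acc) =
          (u.foldl (pvIns drop) PySem.Dict.empty, acc ++ [part]) := by
        rw [hultail, PySem.List.enumerate_cons, List.foldl_cons, hb,
            pv_noBoundary n drop _ (s + 1), List.foldl_cons]
        intro j hj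
        right
        refine pv_mod_ne_zero n s (s + 1 + j) hdvd (by omega) ?_
        have : (r.take (n.toNat - 1)).length ≤ n.toNat - 1 := by
          simpa using List.length_take_le (n.toNat - 1) r
        push_cast
        omega
      have hvne : v ≠ [] := by
        have : v.length = (x :: r).length - n.toNat := by simp [hv]
        intro h
        rw [h] at this
        simp at this
        omega
      have hvlen : v.length ≤ fuel := by
        have : v.length = (x :: r).length - n.toNat := by simp [hv]
        omega
      have hguard : n < (((x :: r).length : Nat) : Int) := by exact_mod_cast hsmall
      have hsl1 : PySem.List.slice (x :: r) none (some n) = u := by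
        rw [PySem.List.slice_to _ (by omega : (0:Int) ≤ n)]
      have hsl2 : PySem.List.slice (x :: r) (some n) none = v := by
        rw [PySem.List.slice_from _ (by omega : (0:Int) ≤ n)]
      conv_rhs => rw [bt_chunks]
      rw [if_pos hguard, hsl1, hsl2]
      rw [hsplit, PySem.List.enumerate_append, List.foldl_append, hchunk,
          ih v hvne hvlen (s + u.length) _ (acc ++ [part]) (by omega)
            (by rw [hlenu, Int.toNat_of_nonneg (by omega)]; exact Dvd.dvd.add hdvd (dvd_refl n))]
      rw [show (fun (d : PySem.Dict String (List String)) (q : String × List String) => if drop && q.2.length == 1 then d else d.insert q.1 q.2) = pvIns drop from rfl]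
      simp
  termination_by fuel => fuel

theorem batch_transcript_dict_spec : Claim_equal_batch_transcript_dict := by
  intro td n drop _ hpre
  have hn : 1 ≤ n := hpre
  unfold Spec_batch_transcript_dict batch_transcript_dict_alt
  rw [batch_eq_foldl_pvStep]
  rcases td with _ | ⟨x, r⟩
  · simp [PySem.List.enumerate_nil, bt_chunks]
  · have hlcons : (x :: r).length = r.length + 1 := rfl
    by_cases hsmall : (((x :: r).length : Nat) : Int) ≤ n
    · -- fewer than (or exactly) n genes: no boundary is ever reached, A returns []
      rw [pv_noBoundary n drop (x :: r) 0 PySem.Dict.empty []]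
      · have hguard : ¬ n < (((x :: r).length : Nat) : Int) := by omega
        rw [show (x :: r).length = ((x :: r).length - 1) + 1 by simp]
        conv_rhs => rw [bt_chunks]
        rw [if_neg hguard]
        simp
      · intro j hj
        rcases Nat.eq_zero_or_pos j with h0 | h0
        · left; simp [h0]
        · right
          refine pv_mod_ne_zero n 0 (0 + j) (dvd_zero n) (by push_cast; omega) ?_
          push_cast at hsmall ⊢
          omega
    · push_neg at hsmall
      have hsm : n.toNat < (x :: r).length := by omega
      set u := (x :: r).take n.toNat with hu
      set v := (x :: r).drop n.toNat with hv
      have hlenu : u.length = n.toNat := by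
        simp [hu, List.length_take]
        omega
      have hsplit : (x :: r) = u ++ v := (List.take_append_drop _ _).symm
      have hfold_u : (PySem.List.enumerate u 0).foldl (pvStep n drop) (PySem.Dict.empty, []) =
          (u.foldl (pvIns drop) PySem.Dict.empty, []) := by
        rw [pv_noBoundary n drop u 0]
        intro j hj
        rcases Nat.eq_zero_or_pos j with h0 | h0
        · left; simp [h0]
        · right
          refine pv_mod_ne_zero n 0 (0 + j) (dvd_zero n) (by push_cast; omega) ?_
          rw [hlenu] at hj
          push_cast
          omega
      have hvne : v ≠ [] := by
        have : v.length = (x :: r).length - n.toNat := by simp [hv]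
        intro h; rw [h] at this; simp at this; omega
      have hlen1 : (x :: r).length = ((x :: r).length - 1) + 1 := by simp
      have hvlen : v.length ≤ (x :: r).length - 1 := by
        have : v.length = (x :: r).length - n.toNat := by simp [hv]
        omega
      have hguard : n < (((x :: r).length : Nat) : Int) := by exact_mod_cast hsmall
      have hsl1 : PySem.List.slice (x :: r) none (some n) = u := by
        rw [PySem.List.slice_to _ (by omega : (0:Int) ≤ n)]
      have hsl2 : PySem.List.slice (x :: r) (some n) none = v := by
        rw [PySem.List.slice_from _ (by omega : (0:Int) ≤ n)]
      conv_rhs => rw [hlen1, bt_chunks]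
      rw [if_pos hguard, hsl1, hsl2]
      rw [hsplit, PySem.List.enumerate_append, List.foldl_append, hfold_u,
          pv_main n drop hn ((x :: r).length - 1) v hvne hvlen (0 + u.length) _ []
            (by rw [hlenu]; omega)
            (by rw [hlenu, Int.toNat_of_nonneg (by omega)]; simp)]
      rw [show (fun (d : PySem.Dict String (List String)) (q : String × List String) => if drop && q.2.length == 1 then d else d.insert q.1 q.2) = pvIns drop from rfl]
      simp
      congr 1
      have hlav : u.length + v.length = r.length + 1 := by
        have h := congrArg List.length hsplit
        simpa using h.symm
      omega
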